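-- pv_equiv track=rewrite | github.com/YanaHontarenko/GeekHub-homework | hw2/2.py | find_dividers
-- ===== SOURCE A (Python) =====
-- def find_dividers(N):
--     if N < 2:
--         return []
--     elif N == 2:
--         return [2]
--     else:
--         for i in range(9, 1, -1):
--             if N % i == 0:
--                 return [i] + find_dividers(N // i)
--                 break
--     return [0]
-- ===== SOURCE B (Python) =====
-- def find_dividers(N):
--     acc = []
--     while N > 2:
--         divs = [i for i in range(2, 10) if N % i == 0]
--         if not divs:
--             return acc + [0]
--         d = max(divs)
--         acc.append(d)
--         N //= d
--     return acc + [2] if N == 2 else acc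
-- ===== Notes on version B (the rewrite author's own statement) =====
-- stated objective: alternative
-- what changed: A's direct recursion (prepend the first divisor found scanning 9..2, recurse on N//i) is replaced by an iterative accumulator loop that each round picks max of the list of single-digit divisors of N; the three terminal cases are kept exactly.
import Mathlib
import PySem

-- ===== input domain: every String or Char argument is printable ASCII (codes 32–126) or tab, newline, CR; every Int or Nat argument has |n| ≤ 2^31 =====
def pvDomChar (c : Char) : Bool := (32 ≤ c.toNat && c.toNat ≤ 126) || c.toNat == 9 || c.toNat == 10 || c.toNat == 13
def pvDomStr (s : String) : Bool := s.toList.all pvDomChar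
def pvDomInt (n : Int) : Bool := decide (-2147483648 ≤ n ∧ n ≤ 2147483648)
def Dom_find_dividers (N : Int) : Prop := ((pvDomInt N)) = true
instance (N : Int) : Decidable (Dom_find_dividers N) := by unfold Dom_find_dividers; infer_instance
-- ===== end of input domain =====

-- B replaces A's direct recursion (cons of the first divisor found scanning 9..2)
-- by an iterative accumulator loop that picks max of the single-digit divisors of N;
-- objective: alternative decomposition, same cost.

-- termination helper (cited by both ports' decreasing_by)
theorem pvDivToNatLt (N i : Int) (hN : 2 < N) (hi : 2 ≤ i) :
    (PySem.Int.floordiv N i).toNat < N.toNat := by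
  have h1 : PySem.Int.floordiv N i < N := by
    rw [PySem.Int.floordiv_lt_iff_lt_mul (by omega)]
    nlinarith
  have h2 : 0 ≤ PySem.Int.floordiv N i := by
    rw [PySem.Int.floordiv_eq_ediv_of_pos (by omega)]
    exact Int.ediv_nonneg (by omega) (by omega)
  omega

theorem pvFindBound {N i : Int}
    (h : List.find? (fun j => PySem.Int.mod N j == 0) [9, 8, 7, 6, 5, 4, 3, 2] = some i) :
    2 ≤ i := by
  have hm := List.mem_of_find?_eq_some h
  simp at hm
  omega

theorem pvMaxBound {N d : Int}
    (h : PySem.List.max? ((PySem.List.pyRange 2 10 1).filter (fun j => PySem.Int.mod N j == 0))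
          (fun x => x) = some d) : 2 ≤ d := by
  have hm := PySem.List.max?_mem h
  have hmem := (List.mem_filter.mp hm).1
  rw [PySem.List.mem_pyRange_one] at hmem
  omega

-- ===== PORT A =====
def find_dividers (N : Int) : List Int :=
  if _h1 : N < 2 then []
  else if _h2 : N = 2 then [2]
  else
    match h : List.find? (fun i => PySem.Int.mod N i == 0) [9, 8, 7, 6, 5, 4, 3, 2] with
    | some i => i :: find_dividers (PySem.Int.floordiv N i)
    | none => [0]
termination_by N.toNat
decreasing_by exact pvDivToNatLt N i (by omega) (pvFindBound h)

-- ===== PORT B =====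
def find_dividers_alt_go (acc : List Int) (N : Int) : List Int :=
  if _h : N > 2 then
    match h : PySem.List.max?
        ((PySem.List.pyRange 2 10 1).filter (fun i => PySem.Int.mod N i == 0)) (fun x => x) with
    | some d => find_dividers_alt_go (acc ++ [d]) (PySem.Int.floordiv N d)
    | none => acc ++ [0]
  else if N = 2 then acc ++ [2] else acc
termination_by N.toNat
decreasing_by exact pvDivToNatLt N d (by omega) (pvMaxBound h)

def find_dividers_alt (N : Int) : List Int := find_dividers_alt_go [] N

-- ===== PRECONDITION & SPEC =====
def Spec_find_dividers (N : Int) (out : List Int) : Prop := out = find_dividers_alt N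
instance (N : Int) (out : List Int) : Decidable (Spec_find_dividers N out) := by unfold Spec_find_dividers; infer_instance

-- ===== CLAIM (what is proved, stated in full; the proofs are below) =====
def Claim_equal_find_dividers : Prop := ∀ (N : Int), Dom_find_dividers N → Spec_find_dividers N (find_dividers N)

-- ===== LEMMAS AND PROOFS =====

-- the first divisor found scanning 9,8,...,2 is the maximum single-digit divisor
theorem pvScanEq (p : Int → Bool) :
    List.find? p [9, 8, 7, 6, 5, 4, 3, 2] =
      PySem.List.max? ((PySem.List.pyRange 2 10 1).filter p) (fun x => x) := by
  have hr : PySem.List.pyRange 2 10 1 = [2, 3, 4, 5, 6, 7, 8, 9] := by decide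
  rw [hr]
  cases h2 : p 2 <;> cases h3 : p 3 <;> cases h4 : p 4 <;> cases h5 : p 5 <;>
    cases h6 : p 6 <;> cases h7 : p 7 <;> cases h8 : p 8 <;> cases h9 : p 9 <;>
    simp [List.find?, List.filter, h2, h3, h4, h5, h6, h7, h8, h9, PySem.List.max?]

theorem pvGoEq : ∀ (n : Nat) (N : Int), N.toNat = n → ∀ acc : List Int,
    find_dividers_alt_go acc N = acc ++ find_dividers N := by
  intro n
  induction n using Nat.strong_induction_on with
  | _ n ih =>
    intro N hn acc
    by_cases hgt : N > 2
    · rw [find_dividers_alt_go.eq_def, find_dividers.eq_def]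
      rw [dif_pos hgt, dif_neg (by omega : ¬ N < 2), dif_neg (by omega : ¬ N = 2)]
      rw [pvScanEq]
      split
      · rename_i d hd
        have hlt : (PySem.Int.floordiv N d).toNat < n := by
          rw [← hn]; exact pvDivToNatLt N d hgt (pvMaxBound hd)
        rw [ih _ hlt _ rfl]
        simp
      · rfl
    · rw [find_dividers_alt_go.eq_def, dif_neg hgt]
      by_cases h2 : N = 2
      · subst h2
        rw [find_dividers.eq_def]
        norm_num
      · rw [if_neg h2, find_dividers.eq_def, dif_pos (by omega : N < 2)]
        simp

-- ===== VERDICT (by name: the statement is the Claim_ definition above) =====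
theorem find_dividers_spec : Claim_equal_find_dividers := by
  intro N _
  show find_dividers N = find_dividers_alt N
  rw [find_dividers_alt, pvGoEq N.toNat N rfl []]
  simp
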